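-- pv_equiv track=rewrite | github.com/JohnMcCodeman5/minimum_linear_arrangement_method_suite | data_generation.py | calculate_total_edge_length
-- ===== SOURCE A (Python) =====
-- def calculate_total_edge_length(graph, solution):
--     total_length = 0
--     for i in range(len(graph)):
--         for j in range(i + 1, len(graph)):
--             if graph[i][j] == 1:
--                 position_i = solution.index(i)
--                 position_j = solution.index(j)
--                 total_length += abs(position_i - position_j)
--     return total_length
-- ===== SOURCE B (Python) =====
-- def calculate_total_edge_length(graph, solution):
--     # Gap-sweep reformulation: |pos_i - pos_j| equals the number of gaps between
--     # consecutive arrangement positions that the edge (i, j) crosses, so we sweep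
--     # the placed-node set left to right and count edge crossings at every gap.
--     edges = [(i, j) for i, row in enumerate(graph)
--                     for j in range(i + 1, len(graph)) if row[j] == 1]
--     total = 0
--     placed = set()
--     for p in range(len(solution) - 1):
--         placed.add(solution[p])
--         for (i, j) in edges:
--             if (i in placed) != (j in placed):
--                 total += 1
--     return total
-- ===== Notes on version B (the rewrite author's own statement) =====
-- stated objective: alternative
-- what changed: Instead of summing |solution.index(i)-solution.index(j)| per edge, B precomputes the edge list once and sweeps the arrangement left to right, counting at each of the n-1 gaps how many edges cross it (exactly one endpoint already placed); the gap-crossing counts sum to the same total by the |pi-pj| = number-of-crossed-gaps identity.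
import Mathlib
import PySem

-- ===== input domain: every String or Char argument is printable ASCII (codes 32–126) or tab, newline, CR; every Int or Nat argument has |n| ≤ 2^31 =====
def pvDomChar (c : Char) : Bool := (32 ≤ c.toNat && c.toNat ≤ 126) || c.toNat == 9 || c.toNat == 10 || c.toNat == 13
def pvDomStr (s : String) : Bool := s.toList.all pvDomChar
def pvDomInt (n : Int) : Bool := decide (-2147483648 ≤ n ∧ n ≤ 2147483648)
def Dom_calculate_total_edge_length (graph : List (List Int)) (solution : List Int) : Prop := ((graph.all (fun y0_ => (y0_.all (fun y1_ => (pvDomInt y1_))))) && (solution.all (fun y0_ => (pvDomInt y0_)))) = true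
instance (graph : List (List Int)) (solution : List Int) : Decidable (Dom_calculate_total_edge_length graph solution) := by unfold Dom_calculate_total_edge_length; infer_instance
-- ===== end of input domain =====

-- B replaces the per-edge |index(i)-index(j)| sum by a left-to-right sweep that counts,
-- at each gap of the arrangement, the edges with exactly one endpoint already placed
-- (same total by the |pi-pj| = number-of-crossed-gaps identity); same asymptotic cost.

-- ===== PORT A =====
-- 'graph[i]' is always in range (i comes from range(len(graph))); 'graph[i][j]' and
-- 'solution.index(·)' can raise in Python — Pre_ excludes exactly those inputs,
-- so the getD defaults below are never the value used on admitted inputs.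
def calculate_total_edge_length (graph : List (List Int)) (solution : List Int) : Int :=
  (PySem.List.pyRange 0 (graph.length : Int) 1).foldl (fun total i =>
    (PySem.List.pyRange (i + 1) (graph.length : Int) 1).foldl (fun total j =>
      if PySem.List.pyGetD (PySem.List.pyGetD graph i []) j 0 = 1 then
        total + |((((PySem.List.index? solution i).getD 0 : Nat) : Int)) -
                 ((((PySem.List.index? solution j).getD 0 : Nat) : Int))|
      else total) total) 0

-- ===== PORT B =====
-- edges = [(i, j) for i, row in enumerate(graph) for j in range(i+1, len(graph)) if row[j] == 1]
def pvEdges (graph : List (List Int)) : List (Int × Int) :=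
  (PySem.List.enumerate graph).flatMap (fun p =>
    ((PySem.List.pyRange (p.1 + 1) (graph.length : Int) 1).filter
      (fun j => decide (PySem.List.pyGetD p.2 j 0 = 1))).map (fun j => (p.1, j)))

def calculate_total_edge_length_alt (graph : List (List Int)) (solution : List Int) : Int :=
  ((PySem.List.pyRange 0 ((solution.length : Int) - 1) 1).foldl
    (fun st p =>
      let placed := PySem.Set.add st.2 (PySem.List.pyGetD solution p 0)
      ((pvEdges graph).foldl (fun t e =>
          if (PySem.Set.contains placed e.1 != PySem.Set.contains placed e.2) then t + 1
          else t) st.1,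
       placed))
    ((0 : Int), (PySem.Set.empty : PySem.Set Int))).1

-- ===== PRECONDITION & SPEC =====
-- Pre_: every cell graph[i][j] read by the loops exists (else Python IndexError) and
-- both endpoints of every edge occur in solution (else solution.index raises ValueError).
def Pre_calculate_total_edge_length (graph : List (List Int)) (solution : List Int) : Prop :=
  ∀ i ∈ List.range graph.length, ∀ j ∈ List.range graph.length, i < j →
    j < (graph.getD i []).length ∧
    ((graph.getD i []).getD j 0 = 1 → (i : Int) ∈ solution ∧ (j : Int) ∈ solution)
instance (graph : List (List Int)) (solution : List Int) : Decidable (Pre_calculate_total_edge_length graph solution) := by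
  unfold Pre_calculate_total_edge_length; infer_instance

def pvWitness_calculate_total_edge_length : List (List Int) × List Int :=
  ([[0, 1, 1], [0, 0, 1], [0, 0, 0]], [2, 0, 1])

def Spec_calculate_total_edge_length (graph : List (List Int)) (solution : List Int) (out : Int) : Prop := out = calculate_total_edge_length_alt graph solution
instance (graph : List (List Int)) (solution : List Int) (out : Int) : Decidable (Spec_calculate_total_edge_length graph solution out) := by unfold Spec_calculate_total_edge_length; infer_instance

-- ===== CLAIM (what is proved, stated in full; the proofs are below) =====
def Claim_equal_calculate_total_edge_length : Prop := ∀ (graph : List (List Int)) (solution : List Int), Dom_calculate_total_edge_length graph solution → Pre_calculate_total_edge_length graph solution → Spec_calculate_total_edge_length graph solution (calculate_total_edge_length graph solution)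

-- ===== LEMMAS AND PROOFS =====

-- first-occurrence index of v in s (Python's solution.index, defaulted outside Pre_)
def pvIdx (s : List Int) (v : Int) : Int := (((PySem.List.index? s v).getD 0 : Nat) : Int)

-- edge e crosses the gap after the first k arranged nodes: exactly one endpoint placed
def pvCross (s : List Int) (k : Nat) (e : Int × Int) : Bool :=
  (decide (e.1 ∈ s.take k)) != (decide (e.2 ∈ s.take k))

theorem pv_sum_flatMap {α : Type} (l : List α) (f : α → List Int) :
    (l.flatMap f).sum = (l.map (fun x => (f x).sum)).sum := by
  induction l with
  | nil => simp
  | cons x xs ih => simp [List.flatMap_cons, ih]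

-- A as the edge-list sum of first-occurrence index distances
theorem pvA_sum (graph : List (List Int)) (solution : List Int) :
    calculate_total_edge_length graph solution
      = ((pvEdges graph).map (fun e => |pvIdx solution e.1 - pvIdx solution e.2|)).sum := by
  unfold calculate_total_edge_length pvEdges
  rw [PySem.List.enumerate_eq_map_pyRange graph [], List.flatMap_map, List.map_flatMap,
    pv_sum_flatMap]
  simp only [PySem.List.foldl_ite_eq_foldl_filter, PySem.List.foldl_add, PySem.List.len_eq,
    List.map_map, Function.comp_def, pvIdx, zero_add]

-- the sweep state after the first m gaps
theorem pvLoop (graph : List (List Int)) (s : List Int) (m : Nat) (hm : m ≤ s.length) :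
    List.foldl (fun st p =>
        let placed := PySem.Set.add st.2 (PySem.List.pyGetD s p 0)
        ((pvEdges graph).foldl (fun t e =>
            if (PySem.Set.contains placed e.1 != PySem.Set.contains placed e.2) then t + 1
            else t) st.1,
         placed))
      ((0 : Int), (PySem.Set.empty : PySem.Set Int)) ((List.range m).map (fun k : Nat => (k : Int)))
    = (((List.range m).map (fun p => (((pvEdges graph).countP (pvCross s (p + 1))) : Int))).sum,
       PySem.Set.ofList (s.take m)) := by
  induction m with
  | zero => simp [PySem.Set.ofList]
  | succ m ih =>
    have hm' : m < s.length := by omega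
    rw [List.range_succ]
    simp only [List.map_append, List.map_cons, List.map_nil, List.foldl_append,
      List.foldl_cons, List.foldl_nil, List.sum_append, List.sum_cons, List.sum_nil]
    rw [ih (by omega)]
    have hget : PySem.List.pyGetD s ((m : Nat) : Int) 0 = s[m] := by
      rw [PySem.List.pyGetD_natCast]; exact List.getD_eq_getElem s 0 hm'
    have htake : s.take m ++ [s[m]] = s.take (m + 1) := by
      rw [List.take_add_one, List.getElem?_eq_getElem hm']; rfl
    have hplaced : PySem.Set.add (PySem.Set.ofList (s.take m)) (PySem.List.pyGetD s ((m : Nat) : Int) 0)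
        = PySem.Set.ofList (s.take (m + 1)) := by
      rw [hget, ← htake, PySem.Set.ofList_append_singleton]
    rw [hplaced, PySem.List.foldl_if_add_one]
    have hcnt : (pvEdges graph).countP
        (fun e => PySem.Set.contains (PySem.Set.ofList (s.take (m + 1))) e.1
          != PySem.Set.contains (PySem.Set.ofList (s.take (m + 1))) e.2)
        = (pvEdges graph).countP (pvCross s (m + 1)) := by
      apply List.countP_congr
      intro e _
      simp [pvCross, PySem.Set.contains_eq_listContains, List.contains_eq_mem,
        PySem.Set.mem_ofList]
    rw [hcnt]
    simp

-- B as the sum over gaps of crossing counts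
theorem pvB_sum (graph : List (List Int)) (solution : List Int) :
    calculate_total_edge_length_alt graph solution
      = ((List.range (solution.length - 1)).map
          (fun p => (((pvEdges graph).countP (pvCross solution (p + 1))) : Int))).sum := by
  unfold calculate_total_edge_length_alt
  by_cases hn : solution.length = 0
  · rw [hn]
    rw [PySem.List.pyRange_one_eq_nil (by norm_num)]
    simp
  · have h1 : ((solution.length : Int) - 1) = ((solution.length - 1 : Nat) : Int) := by omega
    rw [h1, PySem.List.pyRange_zero_nat, pvLoop graph solution (solution.length - 1) (by omega)]

-- double-sum interchange
theorem pv_sum_swap {α β : Type} (ps : List α) (es : List β) (f : α → β → Int) :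
    (ps.map (fun p => (es.map (f p)).sum)).sum
      = (es.map (fun e => (ps.map (fun p => f p e)).sum)).sum := by
  induction ps with
  | nil => simp
  | cons p ps ih => simp [ih]

theorem pv_count_between (m lo hi : Nat) (h : lo ≤ hi) :
    (List.range m).countP (fun p => (decide (lo ≤ p)) != decide (hi ≤ p))
      = min m hi - min m lo := by
  induction m with
  | zero => simp
  | succ m ih =>
    rw [List.range_succ, List.countP_append, ih, List.countP_singleton]
    by_cases hlo : lo ≤ m <;> by_cases hhi : hi ≤ m <;> simp [hlo, hhi] <;> omega

theorem pv_idx_getD (s : List Int) (v : Int) (h : v ∈ s) :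
    (List.idxOf? v s).getD 0 = s.idxOf v := by
  induction s with
  | nil => simp at h
  | cons x xs ih =>
    by_cases hx : x = v
    · simp [List.idxOf?_cons, hx]
    · have hv : v ∈ xs := by
        rcases List.mem_cons.mp h with h' | h'
        · exact absurd h'.symm hx
        · exact h'
      have hsome : (List.idxOf? v xs).isSome := by
        rw [← PySem.List.index?_eq_idxOf?]
        exact (PySem.List.index?_isSome_iff xs v).mpr hv
      obtain ⟨k, hk⟩ := Option.isSome_iff_exists.mp hsome
      have hkk := ih hv
      rw [hk] at hkk
      simp only [Option.getD_some] at hkk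
      simp [List.idxOf?_cons, hx, hk, hkk]

theorem pv_bne_comm (a b : Bool) : (a != b) = (b != a) := by
  cases a <;> cases b <;> rfl

-- per edge: the number of crossed gaps equals the index distance
theorem pv_edge_gap (s : List Int) (e : Int × Int) (h1 : e.1 ∈ s) (h2 : e.2 ∈ s) :
    ((List.range (s.length - 1)).map
        (fun p => if pvCross s (p + 1) e then (1 : Int) else 0)).sum
      = |pvIdx s e.1 - pvIdx s e.2| := by
  rw [PySem.List.sum_map_ite_one_zero]
  have hi1 : pvIdx s e.1 = (s.idxOf e.1 : Int) := by
    unfold pvIdx; rw [PySem.List.index?_eq_idxOf?, pv_idx_getD s e.1 h1]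
  have hi2 : pvIdx s e.2 = (s.idxOf e.2 : Int) := by
    unfold pvIdx; rw [PySem.List.index?_eq_idxOf?, pv_idx_getD s e.2 h2]
  have hl1 : s.idxOf e.1 < s.length := List.idxOf_lt_length_of_mem h1
  have hl2 : s.idxOf e.2 < s.length := List.idxOf_lt_length_of_mem h2
  have hcross : ∀ p : Nat, pvCross s (p + 1) e
      = ((decide (s.idxOf e.1 ≤ p)) != decide (s.idxOf e.2 ≤ p)) := by
    intro p
    unfold pvCross
    congr 1
    · exact decide_eq_decide.mpr ((List.mem_take_iff_idxOf_lt h1).trans (by omega))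
    · exact decide_eq_decide.mpr ((List.mem_take_iff_idxOf_lt h2).trans (by omega))
  rw [List.countP_congr (fun p _ => by rw [hcross p])]
  rcases le_total (s.idxOf e.1) (s.idxOf e.2) with hle | hle
  · rw [pv_count_between (s.length - 1) _ _ hle, hi1, hi2]
    rw [abs_of_nonpos (by omega)]
    omega
  · rw [List.countP_congr (fun p _ => by rw [pv_bne_comm]),
      pv_count_between (s.length - 1) _ _ hle, hi1, hi2]
    rw [abs_of_nonneg (by omega)]
    omega

-- membership in the edge list gives the Pre_ instantiation data
theorem pv_mem_pvEdges (graph : List (List Int)) (e : Int × Int) (h : e ∈ pvEdges graph) :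
    ∃ i j : Nat, e = ((i : Int), (j : Int)) ∧ i < j ∧ j < graph.length ∧
      (graph.getD i []).getD j 0 = 1 := by
  unfold pvEdges at h
  rw [PySem.List.enumerate_eq_map_pyRange graph []] at h
  simp only [List.flatMap_map, List.mem_flatMap, List.mem_map, List.mem_filter,
    PySem.List.mem_pyRange_one, PySem.List.len_eq, decide_eq_true_eq] at h
  obtain ⟨i, ⟨hi0, hin⟩, j, ⟨⟨hj1, hjn⟩, hcell⟩, he⟩ := h
  refine ⟨i.toNat, j.toNat, ?_, by omega, by omega, ?_⟩
  · rw [← he]; congr 1 <;> omega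
  · have hi' : (i.toNat : Int) = i := by omega
    have hj' : (j.toNat : Int) = j := by omega
    rw [← hi', ← hj', PySem.List.pyGetD_natCast, PySem.List.pyGetD_natCast] at hcell
    exact hcell

-- ===== VERDICT (by name: the statement is the Claim_ definition above) =====
theorem calculate_total_edge_length_spec : Claim_equal_calculate_total_edge_length := by
  intro graph solution _ hpre
  unfold Spec_calculate_total_edge_length
  rw [pvA_sum, pvB_sum]
  rw [show ((List.range (solution.length - 1)).map
        (fun p => (((pvEdges graph).countP (pvCross solution (p + 1))) : Int))).sum
      = ((List.range (solution.length - 1)).map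
          (fun p => ((pvEdges graph).map
            (fun e => if pvCross solution (p + 1) e then (1 : Int) else 0)).sum)).sum by
    congr 1
    apply List.map_congr_left
    intro p _
    rw [PySem.List.sum_map_ite_one_zero]]
  rw [pv_sum_swap]
  congr 1
  apply List.map_congr_left
  intro e he
  obtain ⟨i, j, hij, hlt, hjn, hcell⟩ := pv_mem_pvEdges graph e he
  have hi : i ∈ List.range graph.length := List.mem_range.mpr (lt_trans hlt hjn)
  have hj : j ∈ List.range graph.length := List.mem_range.mpr hjn
  obtain ⟨hm1, hm2⟩ := (hpre i hi j hj hlt).2 hcell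
  rw [pv_edge_gap solution e (by rw [hij]; exact hm1) (by rw [hij]; exact hm2)]
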